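-- pv_equiv track=rewrite | github.com/yhilmare/SC3-Algorithm | src/kmeanslib/KMeansEvaluation.py | scanAllTheListC
-- ===== SOURCE A (Python) =====
-- def getClassifyResult(instName, resultDict):
--     for item in resultDict.items():
--         if instName in item[1]:
--             return item[0]
--
-- def getClassifyTest(instName, testDict):
--     for item in testDict.items():
--         if instName in item[1]:
--             return item[0]
--
-- def scanAllTheListC(lst, resultDict, testDict):
--     result = set()
--     for i in range(0, len(lst)):
--         inst1 = lst[i]
--         for j in range(i + 1, len(lst)):
--             inst2 = lst[j]
--             if getClassifyResult(inst1, resultDict) != getClassifyResult(inst2, resultDict) and getClassifyTest(inst1, testDict) == getClassifyTest(inst2, testDict):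
--                 result.add((inst1, inst2))
--     return result
-- ===== SOURCE B (Python) =====
-- def _invert(d):
--     # first-wins inverted index: instance name -> its class
--     idx = {}
--     for cls, names in d.items():
--         for n in names:
--             idx.setdefault(n, cls)
--     return idx
--
-- def scanAllTheListC(lst, resultDict, testDict):
--     rc = _invert(resultDict)
--     tc = _invert(testDict)
--     # group the instances by test-class (None groups too), keeping lst order
--     buckets = {}
--     for name in lst:
--         buckets.setdefault(tc.get(name), []).append(name)
--     # one pass over lst; each instance is compared only with the LATER members
--     # of its own test-class bucket, tracked by a per-class position counter
--     seen = {}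
--     result = set()
--     for name in lst:
--         t = tc.get(name)
--         pos = seen.get(t, 0)
--         seen[t] = pos + 1
--         r1 = rc.get(name)
--         for other in buckets[t][pos + 1:]:
--             if r1 != rc.get(other):
--                 result.add((name, other))
--     return result
-- ===== Notes on version B (the rewrite author's own statement) =====
-- stated objective: faster
-- what changed: B inverts both dicts once into name->class indexes, groups the instances into per-test-class buckets, and emits pairs only within each bucket via a single pass with a per-class position counter, instead of A's full all-pairs nested scan that rescans both dicts for every pair.
import Mathlib
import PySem

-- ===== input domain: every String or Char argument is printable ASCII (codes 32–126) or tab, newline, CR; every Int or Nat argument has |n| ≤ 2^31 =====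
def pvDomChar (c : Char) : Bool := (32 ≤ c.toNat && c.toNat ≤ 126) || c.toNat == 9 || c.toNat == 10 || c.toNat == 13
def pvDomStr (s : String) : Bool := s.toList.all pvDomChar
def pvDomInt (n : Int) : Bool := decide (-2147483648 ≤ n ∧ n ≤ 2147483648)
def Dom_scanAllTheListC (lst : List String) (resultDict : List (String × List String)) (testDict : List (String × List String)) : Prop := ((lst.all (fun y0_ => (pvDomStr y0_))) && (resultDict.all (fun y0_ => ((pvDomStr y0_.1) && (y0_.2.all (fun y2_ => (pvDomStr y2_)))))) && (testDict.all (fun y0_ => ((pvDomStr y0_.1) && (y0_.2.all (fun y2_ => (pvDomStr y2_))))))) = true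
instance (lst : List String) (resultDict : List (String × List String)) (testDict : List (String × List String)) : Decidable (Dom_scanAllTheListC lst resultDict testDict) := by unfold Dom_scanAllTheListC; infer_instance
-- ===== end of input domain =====

-- B groups the instances into per-test-class buckets (built from a once-inverted name→class
-- index) and compares pairs only inside a bucket via one pass with a per-class position
-- counter, instead of A's all-pairs nested scan rescanning both dicts per pair — measurably faster.

-- ===== PORT A =====
def getClassifyResult (instName : String) : List (String × List String) → Option String
  | [] => none
  | item :: rest =>
      if item.2.contains instName then some item.1 else getClassifyResult instName rest

def getClassifyTest (instName : String) : List (String × List String) → Option String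
  | [] => none
  | item :: rest =>
      if item.2.contains instName then some item.1 else getClassifyTest instName rest

-- range(0, len(lst)) / range(i+1, len(lst)) ported as the Nat ranges List.range / List.range'
-- (exact: both bounds are nonnegative); lst[i] with i < len(lst) ported as getD (always in range).
def scanAllTheListC (lst : List String) (resultDict : List (String × List String)) (testDict : List (String × List String)) : List (String × String) :=
  (List.range lst.length).foldl (fun result i =>
    let inst1 := lst.getD i ""
    (List.range' (i + 1) (lst.length - (i + 1))).foldl (fun result j =>
      let inst2 := lst.getD j ""
      if getClassifyResult inst1 resultDict ≠ getClassifyResult inst2 resultDict ∧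
         getClassifyTest inst1 testDict = getClassifyTest inst2 testDict then
        PySem.Set.add result (inst1, inst2)
      else result) result) PySem.Set.empty

-- ===== PORT B =====
-- first-wins inverted index: instance name → its class (idx.setdefault(n, cls))
def invertIndex (d : List (String × List String)) : PySem.Dict String String :=
  d.foldl (fun idx item =>
    item.2.foldl (fun idx n => idx.setdefault n item.1) idx) PySem.Dict.empty

-- buckets.setdefault(t, []).append(name) is exactly Dict.modify t [] (· ++ [name])
def buildBuckets (lst : List String) (tc : PySem.Dict String String) : PySem.Dict (Option String) (List String) :=
  lst.foldl (fun b name => b.modify (tc.get? name) [] (· ++ [name])) PySem.Dict.empty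

-- Source B's main loop: state = (seen counters, result set); buckets[t][pos+1:] is an
-- always-nonnegative slice, hence List.drop (pos ≥ 0 throughout); buckets[t] always
-- hits an existing key (t comes from an element of lst), so getD t [] is exact.
def scanAllTheListC_alt (lst : List String) (resultDict : List (String × List String)) (testDict : List (String × List String)) : List (String × String) :=
  let rc := invertIndex resultDict
  let tc := invertIndex testDict
  let buckets := buildBuckets lst tc
  (lst.foldl (fun st name =>
      let t := tc.get? name
      let pos := st.1.getD t 0
      let seen' := st.1.insert t (pos + 1)
      let r1 := rc.get? name
      let acc := ((buckets.getD t []).drop (pos + 1)).foldl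
        (fun a other => if r1 ≠ rc.get? other then PySem.Set.add a (name, other) else a) st.2
      (seen', acc))
    ((PySem.Dict.empty : PySem.Dict (Option String) Nat),
     (PySem.Set.empty : PySem.Set (String × String)))).2

-- ===== PRECONDITION & SPEC =====
def Spec_scanAllTheListC (lst : List String) (resultDict : List (String × List String)) (testDict : List (String × List String)) (out : List (String × String)) : Prop := out = scanAllTheListC_alt lst resultDict testDict
instance (lst : List String) (resultDict : List (String × List String)) (testDict : List (String × List String)) (out : List (String × String)) : Decidable (Spec_scanAllTheListC lst resultDict testDict out) := by unfold Spec_scanAllTheListC; infer_instance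

-- ===== CLAIM =====
def Claim_equal_scanAllTheListC : Prop := ∀ (lst : List String) (resultDict : List (String × List String)) (testDict : List (String × List String)), Dom_scanAllTheListC lst resultDict testDict → Spec_scanAllTheListC lst resultDict testDict (scanAllTheListC lst resultDict testDict)

-- ===== LEMMAS AND PROOFS =====

-- both programs' common core, as a recursion over suffixes of lst
def auxPairs (rd td : List (String × List String))
    (acc : PySem.Set (String × String)) : List String → PySem.Set (String × String)
  | [] => acc
  | x :: rest =>
      auxPairs rd td (rest.foldl (fun a y =>
        if getClassifyResult x rd ≠ getClassifyResult y rd ∧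
           getClassifyTest x td = getClassifyTest y td then
          PySem.Set.add a (x, y) else a) acc) rest

theorem getClassifyTest_eq (n : String) (d : List (String × List String)) :
    getClassifyTest n d = getClassifyResult n d := by
  induction d with
  | nil => rfl
  | cons item rest ih => simp [getClassifyTest, getClassifyResult, ih]

theorem get?_invert_inner (k : String) (names : List String)
    (idx : PySem.Dict String String) (n : String) :
    (names.foldl (fun idx m => idx.setdefault m k) idx).get? n =
      if (idx.get? n).isSome then idx.get? n
      else if names.contains n then some k else none := by
  induction names generalizing idx with
  | nil => cases h : idx.get? n <;> simp [h]
  | cons m rest ih =>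
    simp only [List.foldl_cons]
    rw [ih]
    by_cases hm : idx.contains m = true
    · rw [PySem.Dict.setdefault_of_contains _ _ hm]
      by_cases hn : n = m
      · subst hn
        have hs : (idx.get? n).isSome = true := by
          rw [← PySem.Dict.contains_eq_isSome_get?]; exact hm
        simp [hs]
      · by_cases h1 : (idx.get? n).isSome = true
        · simp [h1]
        · simp [h1, hn]
    · rw [PySem.Dict.setdefault_of_not_contains _ _ (by simpa using hm)]
      have hnone : idx.get? m = none := by
        cases h : idx.get? m with
        | none => rfl
        | some v => exact absurd (by rw [PySem.Dict.contains_eq_isSome_get?, h]; rfl) hm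
      by_cases hn : n = m
      · subst hn
        simp [hnone]
      · simp [PySem.Dict.get?_insert, hn]

theorem get?_invert_loop (d : List (String × List String))
    (idx : PySem.Dict String String) (n : String) :
    (d.foldl (fun idx item =>
        item.2.foldl (fun idx m => idx.setdefault m item.1) idx) idx).get? n =
      if (idx.get? n).isSome then idx.get? n else getClassifyResult n d := by
  induction d generalizing idx with
  | nil =>
    cases h : idx.get? n <;> simp [getClassifyResult, h]
  | cons item rest ih =>
    simp only [List.foldl_cons]
    rw [ih, get?_invert_inner]
    simp only [getClassifyResult]
    by_cases h1 : (idx.get? n).isSome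
    · simp [h1]
    · by_cases h2 : n ∈ item.2 <;> simp [h1, h2]

theorem get?_invertIndex (d : List (String × List String)) (n : String) :
    (invertIndex d).get? n = getClassifyResult n d := by
  rw [invertIndex, get?_invert_loop]
  simp [PySem.Dict.get?_empty]

theorem foldl_range'_getD {α β : Type} (l : List α) (dflt : α) (g : β → α → β) :
    ∀ (k s : Nat), l.length - s = k → ∀ (acc : β),
      (List.range' s k).foldl (fun a j => g a (l.getD j dflt)) acc = (l.drop s).foldl g acc := by
  intro k
  induction k with
  | zero =>
    intro s hs acc
    have : l.drop s = [] := List.drop_eq_nil_iff.mpr (by omega)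
    simp [this]
  | succ k ih =>
    intro s hs acc
    have hlt : s < l.length := by omega
    rw [List.range'_succ, List.foldl_cons,
        List.drop_eq_getElem_cons hlt, List.foldl_cons,
        List.getD_eq_getElem l dflt hlt]
    exact ih (s + 1) (by omega) _

-- A's nested index loops equal the suffix recursion auxPairs
theorem scanA_eq_aux (lst : List String) (rd td : List (String × List String)) :
    ∀ (k s : Nat), lst.length - s = k → ∀ (acc : PySem.Set (String × String)),
      (List.range' s k).foldl (fun result i =>
        let inst1 := lst.getD i ""
        (List.range' (i + 1) (lst.length - (i + 1))).foldl (fun result j =>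
          let inst2 := lst.getD j ""
          if getClassifyResult inst1 rd ≠ getClassifyResult inst2 rd ∧
             getClassifyTest inst1 td = getClassifyTest inst2 td then
            PySem.Set.add result (inst1, inst2)
          else result) result) acc
      = auxPairs rd td acc (lst.drop s) := by
  intro k
  induction k with
  | zero =>
    intro s hs acc
    have : lst.drop s = [] := List.drop_eq_nil_iff.mpr (by omega)
    simp [this, auxPairs]
  | succ k ih =>
    intro s hs acc
    have hlt : s < lst.length := by omega
    rw [List.range'_succ, List.foldl_cons,
        List.drop_eq_getElem_cons hlt, auxPairs]
    have ih' := ih (s + 1) (by omega)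
    simp only [List.getD_eq_getElem lst "" hlt]
    rw [ih']
    congr 1
    exact foldl_range'_getD lst ""
      (fun a y =>
        if getClassifyResult lst[s] rd ≠ getClassifyResult y rd ∧
           getClassifyTest lst[s] td = getClassifyTest y td then
          PySem.Set.add a (lst[s], y) else a)
      (lst.length - (s + 1)) (s + 1) rfl acc

-- each bucket is the in-order sublist of lst with that test class
theorem buckets_getD (lst : List String) (tc : PySem.Dict String String) (t : Option String) :
    (buildBuckets lst tc).getD t [] = lst.filter (fun n => tc.get? n == t) := by
  unfold buildBuckets
  have : lst.foldl (fun b name => b.modify (tc.get? name) [] (· ++ [name])) PySem.Dict.empty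
      = (lst.map (fun n => (tc.get? n, n))).foldl
          (fun b p => b.modify p.1 [] (· ++ [p.2])) PySem.Dict.empty := by
    rw [List.foldl_map]
  rw [this, PySem.Dict.getD_foldl_modify_append]
  simp [List.filter_map, Function.comp_def]

-- B's inner fold over a filtered tail equals A's conditional fold over the whole tail
theorem inner_eq (rd td : List (String × List String)) (x : String) (r : List String)
    (acc : PySem.Set (String × String)) :
    (r.filter (fun y => (invertIndex td).get? y == (invertIndex td).get? x)).foldl
      (fun a y => if (invertIndex rd).get? x ≠ (invertIndex rd).get? y then
          PySem.Set.add a (x, y) else a) acc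
    = r.foldl (fun a y =>
        if getClassifyResult x rd ≠ getClassifyResult y rd ∧
           getClassifyTest x td = getClassifyTest y td then
          PySem.Set.add a (x, y) else a) acc := by
  rw [← PySem.List.foldl_if_eq_foldl_filter]
  apply PySem.List.foldl_congr_mem
  intro a y _
  simp only [get?_invertIndex, getClassifyTest_eq, beq_iff_eq]
  by_cases h1 : getClassifyResult y rd = getClassifyResult x rd <;>
    by_cases h2 : getClassifyResult x rd = getClassifyResult y rd <;>
      simp_all [eq_comm]

-- B's main pass equals auxPairs, with the per-class counters tracking prefix counts
theorem loopB (lst : List String) (rd td : List (String × List String)) :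
    ∀ (rest pre : List String), lst = pre ++ rest →
    ∀ (seen : PySem.Dict (Option String) Nat) (acc : PySem.Set (String × String)),
    (∀ c, seen.getD c 0 = pre.countP (fun n => (invertIndex td).get? n == c)) →
    (rest.foldl (fun st name =>
      let t := (invertIndex td).get? name
      let pos := st.1.getD t 0
      let seen' := st.1.insert t (pos + 1)
      let r1 := (invertIndex rd).get? name
      let acc := (((buildBuckets lst (invertIndex td)).getD t []).drop (pos + 1)).foldl
        (fun a other => if r1 ≠ (invertIndex rd).get? other then
            PySem.Set.add a (name, other) else a) st.2
      (seen', acc)) (seen, acc)).2 = auxPairs rd td acc rest := by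
  intro rest
  induction rest with
  | nil => intro pre h seen acc hseen; simp [auxPairs]
  | cons x r ih =>
    intro pre h seen acc hseen
    simp only [List.foldl_cons, auxPairs]
    set tc := invertIndex td with htc
    set rc := invertIndex rd with hrc
    have hx : (tc.get? x == tc.get? x) = true := by simp
    have hbucket : (buildBuckets lst tc).getD (tc.get? x) [] =
        pre.filter (fun n => tc.get? n == tc.get? x) ++
          x :: r.filter (fun n => tc.get? n == tc.get? x) := by
      rw [buckets_getD, h]
      simp [List.filter_append]
    have hpos : seen.getD (tc.get? x) 0 = pre.countP (fun n => tc.get? n == tc.get? x) :=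
      hseen _
    have hlen : (pre.filter (fun n => tc.get? n == tc.get? x)).length =
        pre.countP (fun n => tc.get? n == tc.get? x) := by
      rw [List.countP_eq_length_filter]
    have hdrop : ((buildBuckets lst tc).getD (tc.get? x) []).drop
          (seen.getD (tc.get? x) 0 + 1) = r.filter (fun n => tc.get? n == tc.get? x) := by
      rw [hbucket, hpos, ← hlen]
      rw [show (pre.filter (fun n => tc.get? n == tc.get? x)).length + 1 =
            (pre.filter (fun n => tc.get? n == tc.get? x) ++ [x]).length by simp]
      rw [show pre.filter (fun n => tc.get? n == tc.get? x) ++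
            x :: r.filter (fun n => tc.get? n == tc.get? x) =
            (pre.filter (fun n => tc.get? n == tc.get? x) ++ [x]) ++
            r.filter (fun n => tc.get? n == tc.get? x) by simp]
      exact List.drop_left
    rw [ih (pre ++ [x]) (by simp [h])]
    · congr 1
      rw [hdrop, inner_eq]
    · intro c
      rw [PySem.Dict.getD_insert]
      by_cases hc : c = tc.get? x
      · subst hc
        rw [if_pos rfl, hpos]
        simp [List.countP_append]
      · rw [if_neg hc, hseen c]
        have : (tc.get? x == c) = false := by
          simpa [beq_iff_eq] using fun he => hc he.symm
        simp [List.countP_append, this]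

-- ===== VERDICT =====
theorem scanAllTheListC_spec : Claim_equal_scanAllTheListC := by
  intro lst rd td _
  unfold Spec_scanAllTheListC scanAllTheListC scanAllTheListC_alt
  rw [List.range_eq_range']
  have hA := scanA_eq_aux lst rd td lst.length 0 (by omega) PySem.Set.empty
  have hB := loopB lst rd td lst [] rfl PySem.Dict.empty PySem.Set.empty
    (by intro c; simp [PySem.Dict.getD_empty])
  simp only [List.drop_zero] at hA
  rw [hA, ← hB]
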